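-- pv_equiv track=rewrite | github.com/VeridonNetzwerk/anime-downloader | aniwatch-dl.py | parse_episode_selection
-- ===== SOURCE A (Python) =====
-- def parse_episode_selection(selection: str, all_eps: list[dict]) -> list[dict]:
--     if not all_eps:
--         return []
--
--     by_num: dict[str, dict] = {str(ep["number"]): ep for ep in all_eps if "number" in ep}
--     numbers = sorted(by_num.keys(), key=lambda x: int(x))
--     if not selection or selection.strip() == "*":
--         return [by_num[n] for n in numbers]
--
--     selection = selection.strip()
--     if selection.lower().startswith("l") and selection[1:].isdigit():
--         count = int(selection[1:])
--         if count <= 0: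
--             return []
--         return [by_num[n] for n in numbers[-count:]]
--
--     picked: set[str] = set()
--     for token in [t.strip() for t in selection.split(",") if t.strip()]:
--         if "-" in token:
--             a, b = token.split("-", 1)
--             if a.isdigit() and b.isdigit():
--                 lo, hi = sorted((int(a), int(b)))
--                 for n in range(lo, hi + 1):
--                     key = str(n)
--                     if key in by_num:
--                         picked.add(key)
--             continue
--         if token.isdigit() and token in by_num:
--             picked.add(token)
--
--     return [by_num[n] for n in numbers if n in picked]
-- ===== SOURCE B (Python) =====
-- def _parse_selector(sel: str):
--     # "lN" -> last-N mode; otherwise collect exact digit tokens and numeric intervals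
--     if sel.lower().startswith("l") and sel[1:].isdigit():
--         return ("last", int(sel[1:]), None)
--     singles = set()
--     intervals = []
--     for raw in sel.split(","):
--         tok = raw.strip()
--         if "-" in tok:
--             a, b = tok.split("-", 1)
--             if a.isdigit() and b.isdigit():
--                 va, vb = int(a), int(b)
--                 intervals.append((min(va, vb), max(va, vb)))
--         elif tok.isdigit():
--             singles.add(tok)
--     return ("pick", singles, intervals)
--
--
-- def _chosen(selection, numbers, val_of):
--     if not selection or selection.strip() == "*":
--         return numbers
--     mode, x, y = _parse_selector(selection.strip())
--     if mode == "last":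
--         return numbers[max(0, len(numbers) - x):] if x > 0 else []
--     singles, intervals = x, y
--     return [n for n in numbers
--             if n in singles
--             or any(lo <= val_of[n] <= hi for lo, hi in intervals)]
--
--
-- def parse_episode_selection(selection: str, all_eps: list[dict]) -> list[dict]:
--     # staged: extract (value, episode) pairs once, then index them two ways
--     pairs = [(ep["number"], ep) for ep in all_eps if "number" in ep]
--     by_num = {str(v): ep for v, ep in pairs}
--     val_of = {str(v): v for v, _ in pairs}
--     numbers = sorted(by_num, key=int)
--     return [by_num[n] for n in _chosen(selection, numbers, val_of)]
-- ===== Notes on version B (the rewrite author's own statement) =====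
-- stated objective: alternative
-- what changed: A enumerates every integer of each 'a-b' range into a picked set inside one monolithic sweep; B stages the work into separate passes - extract (value, episode) pairs once, build the key index and a key-to-value index by comprehensions, parse the selection once into a last-N / (singles, intervals) selector - and tests each existing episode key against the interval list, so no loop depends on the integer span of a range.
import Mathlib
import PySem

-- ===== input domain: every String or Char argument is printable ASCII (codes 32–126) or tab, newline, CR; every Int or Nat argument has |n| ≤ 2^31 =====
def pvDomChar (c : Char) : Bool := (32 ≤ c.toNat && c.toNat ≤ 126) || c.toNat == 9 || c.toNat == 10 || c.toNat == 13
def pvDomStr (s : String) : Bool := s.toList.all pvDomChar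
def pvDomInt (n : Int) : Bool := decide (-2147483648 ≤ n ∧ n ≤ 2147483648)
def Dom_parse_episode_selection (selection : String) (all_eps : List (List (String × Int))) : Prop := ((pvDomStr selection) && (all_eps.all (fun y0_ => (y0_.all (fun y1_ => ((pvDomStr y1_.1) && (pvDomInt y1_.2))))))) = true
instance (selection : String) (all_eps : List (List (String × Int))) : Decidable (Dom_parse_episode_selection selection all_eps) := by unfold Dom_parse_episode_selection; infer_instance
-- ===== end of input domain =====

-- B is an alternative decomposition: instead of A's single sweep that enumerates every integer
-- of each "a-b" range into a picked set, B stages the work — one pass extracting (value, episode)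
-- pairs, two small index comprehensions, a selector parsed once into last-N / (singles, intervals)
-- form, and a final render pass — so no loop ever enumerates the integer span of a range.

-- ===== PORT A =====
-- loop body of A's dict comprehension {str(ep["number"]): ep for ep in all_eps if "number" in ep}
def pvStepA (d : PySem.Dict String (List (String × Int))) (ep : List (String × Int)) :
    PySem.Dict String (List (String × Int)) :=
  match (PySem.Dict.ofList ep).get? "number" with
  | some v => d.insert (PySem.Int.toStr v) ep
  | none => d

-- loop body of A's 'for token in …' loop (token already stripped and nonempty)
def pvTokStepA (by_num : PySem.Dict String (List (String × Int)))
    (picked : PySem.Set String) (token : String) : PySem.Set String :=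
  if PySem.Str.isIn "-" token then
    match (PySem.Str.splitMax? token "-" 1).getD [] with
    | [a, b] =>
      if PySem.Str.strIsdigit a && PySem.Str.strIsdigit b then
        match PySem.List.sorted [(PySem.Int.ofStr? a).getD 0, (PySem.Int.ofStr? b).getD 0]
            (fun x => x) false with
        | [lo, hi] =>
          (PySem.List.pyRange lo (hi + 1) 1).foldl
            (fun p m =>
              if by_num.contains (PySem.Int.toStr m) then p.add (PySem.Int.toStr m) else p)
            picked
        | _ => picked
      else picked
    | _ => picked
  else
    if PySem.Str.strIsdigit token && by_num.contains token then picked.add token else picked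

def parse_episode_selection (selection : String) (all_eps : List (List (String × Int))) : List (List (String × Int)) :=
  if all_eps = [] then []
  else
    let by_num := all_eps.foldl pvStepA PySem.Dict.empty
    let numbers := PySem.List.sorted by_num.keys (fun x => (PySem.Int.ofStr? x).getD 0) false
    if selection = "" || PySem.Str.strip selection = "*" then
      numbers.map (fun n => by_num.getD n [])
    else
      let selection := PySem.Str.strip selection
      if PySem.Str.startswith (PySem.Str.lower selection) "l"
          && PySem.Str.strIsdigit (PySem.Str.slice selection (some 1) none) then
        let count := (PySem.Int.ofStr? (PySem.Str.slice selection (some 1) none)).getD 0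
        if count ≤ 0 then []
        else (PySem.List.slice numbers (some (-count)) none).map (fun n => by_num.getD n [])
      else
        let tokens := (((PySem.Str.split? selection ",").getD []).map PySem.Str.strip).filter
          (fun t => t ≠ "")
        let picked := tokens.foldl (pvTokStepA by_num) PySem.Set.empty
        (numbers.filter (fun n => picked.contains n)).map (fun n => by_num.getD n [])

-- ===== PORT B =====
-- the parsed form of a selection string: last-N, or exact tokens plus numeric intervals
inductive PvSel where
  | last : Int → PvSel
  | pick : PySem.Set String → List (Int × Int) → PvSel

-- loop body of B's _parse_selector token loop
def pvTokStepB (acc : PySem.Set String × List (Int × Int)) (raw : String) :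
    PySem.Set String × List (Int × Int) :=
  let tok := PySem.Str.strip raw
  if PySem.Str.isIn "-" tok then
    match (PySem.Str.splitMax? tok "-" 1).getD [] with
    | [a, b] =>
      if PySem.Str.strIsdigit a && PySem.Str.strIsdigit b then
        let va := (PySem.Int.ofStr? a).getD 0
        let vb := (PySem.Int.ofStr? b).getD 0
        (acc.1, acc.2 ++ [(min va vb, max va vb)])
      else acc
    | _ => acc
  else if PySem.Str.strIsdigit tok then (acc.1.add tok, acc.2)
  else acc

-- B's _parse_selector
def pvParseSelector (sel : String) : PvSel :=
  if PySem.Str.startswith (PySem.Str.lower sel) "l"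
      && PySem.Str.strIsdigit (PySem.Str.slice sel (some 1) none) then
    .last ((PySem.Int.ofStr? (PySem.Str.slice sel (some 1) none)).getD 0)
  else
    let acc := ((PySem.Str.split? sel ",").getD []).foldl pvTokStepB (PySem.Set.empty, [])
    .pick acc.1 acc.2

-- B's first comprehension: [(ep["number"], ep) for ep in all_eps if "number" in ep]
def pvPairsB (all_eps : List (List (String × Int))) : List (Int × List (String × Int)) :=
  all_eps.foldl (fun acc ep =>
    match (PySem.Dict.ofList ep).get? "number" with
    | some v => acc ++ [(v, ep)]
    | none => acc) []

-- B's dict comprehensions over the extracted pairs, and the sorted key list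
def pvByNum (all_eps : List (List (String × Int))) : PySem.Dict String (List (String × Int)) :=
  (pvPairsB all_eps).foldl (fun d p => d.insert (PySem.Int.toStr p.1) p.2) PySem.Dict.empty

def pvValOfD (all_eps : List (List (String × Int))) : PySem.Dict String Int :=
  (pvPairsB all_eps).foldl (fun d p => d.insert (PySem.Int.toStr p.1) p.1) PySem.Dict.empty

def pvNumbers (all_eps : List (List (String × Int))) : List String :=
  PySem.List.sorted (pvByNum all_eps).keys (fun n => (PySem.Int.ofStr? n).getD 0) false

-- the chosen keys, by selector
def pvChosenB (selection : String) (numbers : List String) (val_of : PySem.Dict String Int) :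
    List String :=
  if selection = "" || PySem.Str.strip selection = "*" then numbers
  else
    match pvParseSelector (PySem.Str.strip selection) with
    | .last x =>
      if x > 0 then
        PySem.List.slice numbers (some (max 0 ((numbers.length : Int) - x))) none
      else []
    | .pick singles intervals =>
      numbers.filter (fun n =>
        singles.contains n
          || intervals.any (fun iv =>
              decide (iv.1 ≤ val_of.getD n 0) && decide (val_of.getD n 0 ≤ iv.2)))

def parse_episode_selection_alt (selection : String) (all_eps : List (List (String × Int))) : List (List (String × Int)) :=
  (pvChosenB selection (pvNumbers all_eps) (pvValOfD all_eps)).map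
    (fun n => (pvByNum all_eps).getD n [])

-- ===== PRECONDITION & SPEC =====
def Spec_parse_episode_selection (selection : String) (all_eps : List (List (String × Int))) (out : List (List (String × Int))) : Prop := out = parse_episode_selection_alt selection all_eps
instance (selection : String) (all_eps : List (List (String × Int))) (out : List (List (String × Int))) : Decidable (Spec_parse_episode_selection selection all_eps out) := by unfold Spec_parse_episode_selection; infer_instance

-- ===== CLAIM (what is proved, stated in full; the proofs are below) =====
def Claim_equal_parse_episode_selection : Prop := ∀ (selection : String) (all_eps : List (List (String × Int))), Dom_parse_episode_selection selection all_eps → Spec_parse_episode_selection selection all_eps (parse_episode_selection selection all_eps)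

-- ===== LEMMAS AND PROOFS =====

-- str(n) for a natural number, as structural recursion on the decimal digits
def pvDig (n : Nat) : List Char :=
  if n < 10 then [Nat.digitChar n] else pvDig (n / 10) ++ [Nat.digitChar (n % 10)]
decreasing_by exact Nat.div_lt_self (by omega) (by omega)

theorem pvDig_eq (n : Nat) : pvDig n
    = if n < 10 then [Nat.digitChar n] else pvDig (n / 10) ++ [Nat.digitChar (n % 10)] := by
  rw [pvDig]

theorem pvToDigitsCore_eq : ∀ (f n : Nat) (ds : List Char), n < f →
    Nat.toDigitsCore 10 f n ds = pvDig n ++ ds := by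
  intro f
  induction f with
  | zero => intro n ds h; omega
  | succ f ih =>
    intro n ds h
    by_cases h10 : n < 10
    · have hz : n / 10 = 0 := Nat.div_eq_of_lt h10
      rw [Nat.toDigitsCore, pvDig_eq]
      simp [hz, Nat.mod_eq_of_lt h10, h10]
    · have hz : ¬ n / 10 = 0 := by intro hc; exact h10 (by omega : n < 10)
      have hlt : n / 10 < f := by
        have := Nat.div_lt_self (by omega : 0 < n) (by omega : 1 < 10)
        omega
      rw [Nat.toDigitsCore]
      simp only [hz, if_false]
      rw [ih (n / 10) (Nat.digitChar (n % 10) :: ds) hlt, pvDig_eq n]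
      simp [h10]

theorem pvToDigits_eq (n : Nat) : Nat.toDigits 10 n = pvDig n := by
  rw [Nat.toDigits, pvToDigitsCore_eq (n + 1) n [] (by omega)]
  simp

theorem pvDigitChar_inj : ∀ a < 10, ∀ b < 10, Nat.digitChar a = Nat.digitChar b → a = b := by
  decide

theorem pvDigitChar_ne_dash : ∀ a < 10, Nat.digitChar a ≠ '-' := by
  decide

theorem pvDig_ne_nil (n : Nat) : pvDig n ≠ [] := by
  rw [pvDig_eq]
  split <;> simp

theorem pvDig_inj : ∀ (m n : Nat), pvDig m = pvDig n → m = n := by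
  intro m
  induction m using Nat.strong_induction_on with
  | _ m ih =>
    intro n h
    rw [pvDig_eq m, pvDig_eq n] at h
    by_cases hm : m < 10 <;> by_cases hn : n < 10
    · rw [if_pos hm, if_pos hn] at h
      exact pvDigitChar_inj m hm n hn (by simpa using h)
    · rw [if_pos hm, if_neg hn] at h
      have hl := congrArg List.length h
      simp only [List.length_cons, List.length_append, List.length_nil] at hl
      exact absurd (List.eq_nil_of_length_eq_zero (by omega)) (pvDig_ne_nil (n / 10))
    · rw [if_neg hm, if_pos hn] at h
      have hl := congrArg List.length h
      simp only [List.length_cons, List.length_append, List.length_nil] at hl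
      exact absurd (List.eq_nil_of_length_eq_zero (by omega)) (pvDig_ne_nil (m / 10))
    · rw [if_neg hm, if_neg hn] at h
      have h2 := List.append_inj' h (by simp)
      have hdiv : m / 10 = n / 10 :=
        ih (m / 10) (Nat.div_lt_self (by omega) (by omega)) _ h2.1
      have hmod : m % 10 = n % 10 :=
        pvDigitChar_inj (m % 10) (Nat.mod_lt _ (by omega)) (n % 10) (Nat.mod_lt _ (by omega))
          (by simpa using h2.2)
      omega

theorem pvDash_not_mem_pvDig (n : Nat) : '-' ∉ pvDig n := by
  induction n using Nat.strong_induction_on with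
  | _ n ih =>
    rw [pvDig_eq]
    by_cases h : n < 10
    · rw [if_pos h]
      intro hc
      have hc' : '-' = Nat.digitChar n := by simpa using hc
      exact pvDigitChar_ne_dash n h hc'.symm
    · rw [if_neg h]
      simp only [List.mem_append, List.mem_singleton]
      rintro (hc | hc)
      · exact ih (n / 10) (Nat.div_lt_self (by omega) (by omega)) hc
      · exact pvDigitChar_ne_dash (n % 10) (Nat.mod_lt _ (by omega)) hc.symm

theorem pvToStr_inj : ∀ {m n : Int}, PySem.Int.toStr m = PySem.Int.toStr n → m = n := by
  intro m n h
  have hc : PySem.Int.toChars m = PySem.Int.toChars n := by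
    rw [← PySem.Int.toList_toStr, ← PySem.Int.toList_toStr, h]
  rw [PySem.Int.toChars, PySem.Int.toChars] at hc
  by_cases hm : m < 0 <;> by_cases hn : n < 0 <;>
      simp only [hm, hn, if_true, if_false, pvToDigits_eq] at hc
  · injection hc with _ h2
    have h3 : m.natAbs = n.natAbs := pvDig_inj _ _ h2
    omega
  · exfalso
    have : '-' ∈ pvDig n.toNat := by rw [← hc]; simp
    exact pvDash_not_mem_pvDig _ this
  · exfalso
    have : '-' ∈ pvDig m.toNat := by rw [hc]; simp
    exact pvDash_not_mem_pvDig _ this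
  · have h2 : m.toNat = n.toNat := pvDig_inj _ _ hc
    omega

-- sorted of a two-element list with the identity key
theorem pvSortedPair (x y : Int) :
    PySem.List.sorted [x, y] (fun z => z) false = [min x y, max x y] := by
  rcases le_total x y with h | h
  · rw [min_eq_left h, max_eq_right h]
    exact PySem.List.sorted_eq_self_of_pairwise _ _ (by simp [h])
  · rcases lt_or_eq_of_le h with h' | h'
    · rw [min_eq_right h, max_eq_left h]
      exact PySem.List.sorted_eq_of_perm_of_pairwise_lt _ _ _ (List.Perm.swap _ _ _)
        (by simp [h'])
    · subst h'
      rw [min_self, max_self]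
      exact PySem.List.sorted_eq_self_of_pairwise _ _ (by simp)

-- a foldl that only appends can be peeled off the accumulator
theorem pvPairs_acc : ∀ (eps : List (List (String × Int)))
    (acc : List (Int × List (String × Int))),
    eps.foldl (fun acc ep =>
      match (PySem.Dict.ofList ep).get? "number" with
      | some v => acc ++ [(v, ep)]
      | none => acc) acc
    = acc ++ eps.foldl (fun acc ep =>
      match (PySem.Dict.ofList ep).get? "number" with
      | some v => acc ++ [(v, ep)]
      | none => acc) [] := by
  intro eps
  induction eps with
  | nil => intro acc; simp
  | cons ep rest ih =>
    intro acc
    simp only [List.foldl_cons]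
    rw [ih, ih ((match (PySem.Dict.ofList ep).get? "number" with
      | some v => [] ++ [(v, ep)] | none => []))]
    cases (PySem.Dict.ofList ep).get? "number" <;> simp

-- fold fusion: A's dict-comprehension fold is B's insert fold over the extracted pairs
theorem pvFoldFuse : ∀ (eps : List (List (String × Int)))
    (d : PySem.Dict String (List (String × Int))),
    eps.foldl pvStepA d
      = (pvPairsB eps).foldl (fun d p => d.insert (PySem.Int.toStr p.1) p.2) d := by
  intro eps
  induction eps with
  | nil => intro d; rfl
  | cons ep rest ih =>
    intro d
    simp only [List.foldl_cons, pvPairsB]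
    rw [pvPairs_acc]
    cases hv : (PySem.Dict.ofList ep).get? "number" with
    | none =>
      rw [ih]
      simp [pvStepA, hv, pvPairsB]
    | some v =>
      rw [ih]
      simp [pvStepA, hv, pvPairsB]

-- the two dicts B builds over the same pairs contain the same keys
theorem pvPairSync : ∀ (ps : List (Int × List (String × Int)))
    (d1 : PySem.Dict String (List (String × Int))) (d2 : PySem.Dict String Int),
    (∀ k, d1.contains k = d2.contains k) →
    ∀ k, (ps.foldl (fun d p => d.insert (PySem.Int.toStr p.1) p.2) d1).contains k
        = (ps.foldl (fun d p => d.insert (PySem.Int.toStr p.1) p.1) d2).contains k := by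
  intro ps
  induction ps with
  | nil => intro d1 d2 h; exact h
  | cons p rest ih =>
    intro d1 d2 h
    simp only [List.foldl_cons]
    apply ih
    intro k
    simp [PySem.Dict.contains_insert, h k]

-- every value stored in val_of is the integer whose str() is its key
theorem pvPairItemsOK : ∀ (ps : List (Int × List (String × Int)))
    (d : PySem.Dict String Int),
    (∀ q ∈ d.items, PySem.Int.toStr q.2 = q.1) →
    ∀ q ∈ (ps.foldl (fun d p => d.insert (PySem.Int.toStr p.1) p.1) d).items,
      PySem.Int.toStr q.2 = q.1 := by
  intro ps
  induction ps with
  | nil => intro d h; exact h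
  | cons p rest ih =>
    intro d h
    simp only [List.foldl_cons]
    apply ih
    intro q hq
    rcases (PySem.Dict.mem_items_insert _ _ _ _).mp hq with hq' | hq'
    · subst hq'; rfl
    · exact h q hq'.1

-- for each key of B's by_num, val_of holds the integer it was built from
theorem pvValOf (all_eps : List (List (String × Int))) (n : String)
    (hn : (pvByNum all_eps).contains n = true) :
    ∃ v, (pvValOfD all_eps).getD n 0 = v ∧ PySem.Int.toStr v = n := by
  rw [pvByNum] at hn
  rw [pvValOfD]
  have hsync := pvPairSync (pvPairsB all_eps) PySem.Dict.empty PySem.Dict.empty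
    (by intro k; rfl) n
  rw [hsync] at hn
  rw [PySem.Dict.contains_eq_isSome_get?] at hn
  rcases hget : ((pvPairsB all_eps).foldl (fun d p => d.insert (PySem.Int.toStr p.1) p.1)
      PySem.Dict.empty).get? n with _ | v
  · rw [hget] at hn; simp at hn
  · refine ⟨v, ?_, ?_⟩
    · rw [PySem.Dict.getD_eq_get?_getD, hget]; rfl
    · have hmem := PySem.Dict.mem_items_of_get?_eq_some _ hget
      exact pvPairItemsOK (pvPairsB all_eps) PySem.Dict.empty
        (by intro q hq; simp [PySem.Dict.empty] at hq) _ hmem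

-- membership in a set after add, as Bool
theorem pvSetContainsAdd (s : PySem.Set String) (x y : String) :
    (s.add x).contains y = (s.contains y || x == y) := by
  by_cases h : y ∈ s.add x
  · rw [(PySem.Set.contains_iff _ _).mpr h]
    rcases (PySem.Set.mem_add _ _ _).mp h with h' | h'
    · rw [(PySem.Set.contains_iff _ _).mpr h']; rfl
    · subst h'; simp
  · have h1 : s.contains y = false := by
      rcases hc : s.contains y with _ | _
      · rfl
      · exact absurd ((PySem.Set.mem_add s x y).mpr (Or.inl ((PySem.Set.contains_iff _ _).mp hc))) h
    have h2 : (x == y) = false := by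
      rcases hc : x == y with _ | _
      · rfl
      · exact absurd ((PySem.Set.mem_add s x y).mpr (Or.inr (beq_iff_eq.mp hc).symm)) h
    have h3 : (s.add x).contains y = false := by
      rcases hc : (s.add x).contains y with _ | _
      · rfl
      · exact absurd ((PySem.Set.contains_iff _ _).mp hc) h
    rw [h1, h2, h3]; rfl

-- A's inner range loop picks key n exactly when the value v of key n lies in the list
theorem pvRangeFold (by_num : PySem.Dict String (List (String × Int))) (n : String) (v : Int)
    (hn : by_num.contains n = true) (hv : PySem.Int.toStr v = n) :
    ∀ (L : List Int) (p : PySem.Set String),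
    ((L.foldl (fun p m =>
        if by_num.contains (PySem.Int.toStr m) then p.add (PySem.Int.toStr m) else p) p).contains n)
      = (p.contains n || L.any (fun m => m == v)) := by
  intro L
  induction L with
  | nil => intro p; simp
  | cons m rest ih =>
    intro p
    simp only [List.foldl_cons, List.any_cons]
    rw [ih]
    by_cases hmv : m = v
    · subst hmv
      rw [hv]
      simp [hn]
    · have hne : (PySem.Int.toStr m == n) = false := by
        rcases hc : PySem.Int.toStr m == n with _ | _
        · rfl
        · exact absurd (pvToStr_inj ((beq_iff_eq.mp hc).trans hv.symm)) hmv
      have hmvb : (m == v) = false := by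
        rcases hc : m == v with _ | _
        · rfl
        · exact absurd (beq_iff_eq.mp hc) hmv
      rw [hmvb]
      split
      · rw [pvSetContainsAdd, hne]
        simp
      · simp

-- one token step preserves the picked/interval correspondence for key n of value v
theorem pvTokStep (by_num : PySem.Dict String (List (String × Int))) (n : String) (v : Int)
    (hn : by_num.contains n = true) (hv : PySem.Int.toStr v = n)
    (raw : String) (acc : PySem.Set String × List (Int × Int)) (p : PySem.Set String)
    (hinv : p.contains n
      = (acc.1.contains n || acc.2.any (fun iv => decide (iv.1 ≤ v) && decide (v ≤ iv.2)))) :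
    (pvTokStepA by_num p (PySem.Str.strip raw)).contains n
      = ((pvTokStepB acc raw).1.contains n
          || (pvTokStepB acc raw).2.any
              (fun iv => decide (iv.1 ≤ v) && decide (v ≤ iv.2))) := by
  rw [pvTokStepA, pvTokStepB]
  by_cases hdash : PySem.Str.isIn "-" (PySem.Str.strip raw) = true
  · simp only [hdash, if_true]
    cases hsp : (PySem.Str.splitMax? (PySem.Str.strip raw) "-" 1).getD [] with
    | nil => exact hinv
    | cons a tl =>
      cases tl with
      | nil => exact hinv
      | cons b tl2 =>
        cases tl2 with
        | cons c tl3 => exact hinv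
        | nil =>
          by_cases hd : (PySem.Str.strIsdigit a && PySem.Str.strIsdigit b) = true
          · simp only [hd, if_true]
            rw [pvSortedPair]
            rw [pvRangeFold by_num n v hn hv, hinv]
            have hany : ((PySem.List.pyRange
                (min ((PySem.Int.ofStr? a).getD 0) ((PySem.Int.ofStr? b).getD 0))
                ((max ((PySem.Int.ofStr? a).getD 0) ((PySem.Int.ofStr? b).getD 0)) + 1) 1).any
                  (fun m => m == v))
                = (decide (min ((PySem.Int.ofStr? a).getD 0) ((PySem.Int.ofStr? b).getD 0) ≤ v)
                    && decide (v ≤ max ((PySem.Int.ofStr? a).getD 0) ((PySem.Int.ofStr? b).getD 0))) := by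
              rcases hmem : (PySem.List.pyRange
                  (min ((PySem.Int.ofStr? a).getD 0) ((PySem.Int.ofStr? b).getD 0))
                  ((max ((PySem.Int.ofStr? a).getD 0) ((PySem.Int.ofStr? b).getD 0)) + 1) 1).any
                  (fun m => m == v) with _ | _
              · have hnm : v ∉ PySem.List.pyRange
                    (min ((PySem.Int.ofStr? a).getD 0) ((PySem.Int.ofStr? b).getD 0))
                    ((max ((PySem.Int.ofStr? a).getD 0) ((PySem.Int.ofStr? b).getD 0)) + 1) 1 := by
                  intro hc
                  have := List.any_eq_false.mp hmem v hc
                  simp at this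
                rw [PySem.List.mem_pyRange_one] at hnm
                by_cases hle : min ((PySem.Int.ofStr? a).getD 0) ((PySem.Int.ofStr? b).getD 0) ≤ v
                · have hgt : ¬ (v ≤ max ((PySem.Int.ofStr? a).getD 0) ((PySem.Int.ofStr? b).getD 0)) := by
                    intro hc; exact hnm ⟨hle, by omega⟩
                  simp [hgt]
                · simp [hle]
              · rcases List.any_eq_true.mp hmem with ⟨m, hm, hmv⟩
                have hmv' : m = v := by simpa using hmv
                subst hmv'
                rw [PySem.List.mem_pyRange_one] at hm
                have h1 : (decide (min ((PySem.Int.ofStr? a).getD 0) ((PySem.Int.ofStr? b).getD 0) ≤ m)) = true := by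
                  simp [hm.1]
                have h2 : (decide (m ≤ max ((PySem.Int.ofStr? a).getD 0) ((PySem.Int.ofStr? b).getD 0))) = true := by
                  simp; omega
                rw [h1, h2]; rfl
            rw [hany]
            simp [Bool.or_assoc]
          · simp only [hd]
            simp only [Bool.false_eq_true, if_false]
            exact hinv
  · simp only [hdash]
    simp only [Bool.false_eq_true, if_false]
    by_cases hdig : PySem.Str.strIsdigit (PySem.Str.strip raw) = true
    · simp only [hdig, Bool.true_and, if_true]
      by_cases hc : by_num.contains (PySem.Str.strip raw) = true
      · simp only [hc, if_true]
        rw [pvSetContainsAdd, pvSetContainsAdd, hinv]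
        simp [Bool.or_assoc, Bool.or_comm, Bool.or_left_comm]
      · simp only [hc]
        simp only [Bool.false_eq_true, if_false]
        have htn : (PySem.Str.strip raw == n) = false := by
          rcases hb : PySem.Str.strip raw == n with _ | _
          · rfl
          · exact absurd (beq_iff_eq.mp hb ▸ hn) hc
        rw [pvSetContainsAdd, htn, hinv]
        simp
    · simp only [hdig]
      simp only [Bool.false_eq_true, Bool.false_and, if_false]
      exact hinv

-- the whole token loop: A's fold over stripped nonempty tokens vs B's fold over the raw splits
theorem pvTokFold (by_num : PySem.Dict String (List (String × Int))) (n : String) (v : Int)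
    (hn : by_num.contains n = true) (hv : PySem.Int.toStr v = n) :
    ∀ (raws : List String) (acc : PySem.Set String × List (Int × Int)) (p : PySem.Set String),
    p.contains n
      = (acc.1.contains n || acc.2.any (fun iv => decide (iv.1 ≤ v) && decide (v ≤ iv.2))) →
    (((raws.map PySem.Str.strip).filter (fun t => t ≠ "")).foldl (pvTokStepA by_num) p).contains n
      = ((raws.foldl pvTokStepB acc).1.contains n
          || (raws.foldl pvTokStepB acc).2.any
              (fun iv => decide (iv.1 ≤ v) && decide (v ≤ iv.2))) := by
  intro raws
  induction raws with
  | nil => intro acc p h; exact h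
  | cons raw rest ih =>
    intro acc p h
    simp only [List.map_cons, List.foldl_cons]
    by_cases hne : PySem.Str.strip raw = ""
    · have hB : pvTokStepB acc raw = acc := by
        have h1 : PySem.Chars.isIn ['-'] ([] : List Char) = false := by decide
        have h2 : PySem.Chars.strIsdigit ([] : List Char) = false := by decide
        rw [pvTokStepB]
        simp [hne, h1, h2]
      rw [hB]
      have : (PySem.Str.strip raw :: rest.map PySem.Str.strip).filter (fun t => t ≠ "")
          = (rest.map PySem.Str.strip).filter (fun t => t ≠ "") := by
        simp [List.filter, hne]
      rw [this]
      exact ih acc p h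
    · have : (PySem.Str.strip raw :: rest.map PySem.Str.strip).filter (fun t => t ≠ "")
          = PySem.Str.strip raw :: (rest.map PySem.Str.strip).filter (fun t => t ≠ "") := by
        simp [List.filter, hne]
      rw [this]
      simp only [List.foldl_cons]
      exact ih _ _ (pvTokStep by_num n v hn hv raw acc p h)

-- Python numbers[-c:] = numbers[max(0, len(numbers)-c):] for c > 0
theorem pvClamp (n : Nat) (x : Int) (hx : 0 < x) :
    PySem.List.clampIdx n (-x) = PySem.List.clampIdx n (max 0 ((n : Int) - x)) := by
  obtain ⟨k, rfl⟩ : ∃ k : Nat, x = (k : Int) := ⟨x.toNat, (Int.toNat_of_nonneg hx.le).symm⟩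
  have hk : 0 < k := by exact_mod_cast hx
  rw [PySem.List.clampIdx_neg_natCast n k hk]
  have hmax : max 0 ((n : Int) - k) = ((n - k : Nat) : Int) := by omega
  rw [hmax, PySem.List.clampIdx_natCast]
  omega

-- B selects nothing from an empty key list
theorem pvChosenNil (selection : String) (d : PySem.Dict String Int) :
    pvChosenB selection [] d = [] := by
  rw [pvChosenB]
  split
  · rfl
  · cases pvParseSelector (PySem.Str.strip selection) with
    | last x => simp [PySem.List.slice_some_none, List.drop_nil]
    | pick s i => rfl

-- ===== VERDICT (by name: the statement is the Claim_ definition above) =====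
theorem parse_episode_selection_spec : Claim_equal_parse_episode_selection := by
  intro selection all_eps _hdom
  unfold Spec_parse_episode_selection
  by_cases hemp : all_eps = []
  · subst hemp
    rw [parse_episode_selection, parse_episode_selection_alt]
    have hnum : pvNumbers [] = [] := rfl
    rw [hnum, pvChosenNil]
    simp
  · rw [parse_episode_selection, parse_episode_selection_alt, pvChosenB, pvNumbers]
    simp only [hemp, if_false]
    have hfuse : all_eps.foldl pvStepA PySem.Dict.empty = pvByNum all_eps := by
      rw [pvByNum]; exact pvFoldFuse all_eps PySem.Dict.empty
    rw [hfuse]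
    by_cases hstar : (selection = "" || PySem.Str.strip selection = "*") = true
    · simp only [hstar, if_true]
    · simp only [hstar]
      simp only [Bool.false_eq_true, if_false]
      rw [pvParseSelector]
      by_cases hl : (PySem.Str.startswith (PySem.Str.lower (PySem.Str.strip selection)) "l"
          && PySem.Str.strIsdigit (PySem.Str.slice (PySem.Str.strip selection) (some 1) none)) = true
      · simp only [hl, if_true]
        by_cases hc : (PySem.Int.ofStr? (PySem.Str.slice (PySem.Str.strip selection) (some 1) none)).getD 0 ≤ 0
        · have hc' : ¬ ((PySem.Int.ofStr? (PySem.Str.slice (PySem.Str.strip selection) (some 1) none)).getD 0 > 0) := by omega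
          simp only [hc, hc', if_true, if_false, List.map_nil]
        · have hc' : (PySem.Int.ofStr? (PySem.Str.slice (PySem.Str.strip selection) (some 1) none)).getD 0 > 0 := by omega
          simp only [hc, hc', if_true, if_false]
          apply congrArg
          rw [PySem.List.slice_some_none, PySem.List.slice_some_none]
          rw [pvClamp _ _ hc']
      · simp only [hl]
        simp only [Bool.false_eq_true, if_false]
        apply congrArg
        apply List.filter_congr
        intro n hnmem
        have hn : (pvByNum all_eps).contains n = true := by
          rw [PySem.Dict.contains_iff_mem_keys]
          exact (PySem.List.mem_sorted _ _ _ n).mp hnmem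
        rcases pvValOf all_eps n hn with ⟨v, hvd, hvs⟩
        rw [hvd]
        have h0 : (PySem.Set.empty : PySem.Set String).contains n
            = ((PySem.Set.empty : PySem.Set String).contains n
                || ([] : List (Int × Int)).any (fun iv => decide (iv.1 ≤ v) && decide (v ≤ iv.2))) := by
          simp
        exact pvTokFold _ n v hn hvs
          ((PySem.Str.split? (PySem.Str.strip selection) ",").getD [])
          (PySem.Set.empty, []) PySem.Set.empty h0
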